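-- pv_equiv track=rewrite | github.com/ecapital1/puppetcode | test/iToolBox2/src/lib/tradeutils.py | match_trade_records
-- ===== SOURCE A (Python) =====
-- def match_trade_records(recordsA, recordsB):
--     match_grp = [];
--     mismatch_A = [];
--
--     for record in recordsA:
--         if(record in recordsB):
--             match_grp.append(record);
--             recordsB.remove(record);
--         else:
--             mismatch_A.append(record)
--
--     return match_grp, mismatch_A, recordsB
-- ===== SOURCE B (Python) =====
-- def match_trade_records(recordsA, recordsB):
--     # One pass to count recordsB, one pass over recordsA decrementing counts,
--     # one pass over recordsB to collect the leftovers in order.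
--     # Note: unlike A, this does not mutate recordsB in place.
--     avail = {}
--     for r in recordsB:
--         avail[r] = avail.get(r, 0) + 1
--     match_grp = []
--     mismatch_A = []
--     removed = {}
--     for r in recordsA:
--         if avail.get(r, 0) > 0:
--             avail[r] = avail.get(r, 0) - 1
--             match_grp.append(r)
--             removed[r] = removed.get(r, 0) + 1
--         else:
--             mismatch_A.append(r)
--     leftover = []
--     for r in recordsB:
--         if removed.get(r, 0) > 0:
--             removed[r] = removed.get(r, 0) - 1
--         else:
--             leftover.append(r)
--     return match_grp, mismatch_A, leftover
-- ===== Notes on version B (the rewrite author's own statement) =====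
-- stated objective: faster
-- what changed: Replaced the per-element 'in recordsB' scan plus list.remove with a dict multiset of recordsB (decremented on match) and a final single pass over recordsB collecting leftovers, so no inner list scans remain; B does not mutate recordsB in place (return value is identical).
import Mathlib
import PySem

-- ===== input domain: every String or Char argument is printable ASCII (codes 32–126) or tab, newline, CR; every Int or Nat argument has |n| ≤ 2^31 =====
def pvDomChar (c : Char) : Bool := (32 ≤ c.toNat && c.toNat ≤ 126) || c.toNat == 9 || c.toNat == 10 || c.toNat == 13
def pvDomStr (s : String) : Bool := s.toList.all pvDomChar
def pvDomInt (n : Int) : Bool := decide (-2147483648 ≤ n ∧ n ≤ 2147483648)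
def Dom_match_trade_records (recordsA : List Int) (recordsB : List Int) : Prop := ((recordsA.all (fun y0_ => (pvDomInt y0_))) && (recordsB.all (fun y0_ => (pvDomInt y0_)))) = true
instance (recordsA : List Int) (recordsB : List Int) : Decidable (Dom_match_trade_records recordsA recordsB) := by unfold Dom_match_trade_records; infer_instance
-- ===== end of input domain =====

-- B replaces A's quadratic per-record scan/remove over recordsB with dict counters and a
-- final leftover pass (faster); equivalence is about the RETURN value only — A also empties
-- matched entries out of the caller's recordsB list in place, B does not mutate it.

-- ===== PORT A =====
-- 'record in recordsB' is Python's list membership; 'recordsB.remove(record)' removes the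
-- first occurrence and is only reached when the element is present: List.erase is exact there.
def match_trade_records (recordsA : List Int) (recordsB : List Int) : List Int × List Int × List Int :=
  recordsA.foldl
    (fun (st : List Int × List Int × List Int) record =>
      if record ∈ st.2.2 then (st.1 ++ [record], st.2.1, st.2.2.erase record)
      else (st.1, st.2.1 ++ [record], st.2.2))
    ([], [], recordsB)

-- ===== PORT B =====
def match_trade_records_alt (recordsA : List Int) (recordsB : List Int) : List Int × List Int × List Int :=
  let avail := recordsB.foldl (fun (d : PySem.Dict Int Int) r => d.insert r (d.getD r 0 + 1)) PySem.Dict.empty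
  let st := recordsA.foldl
    (fun (st : PySem.Dict Int Int × List Int × List Int × PySem.Dict Int Int) r =>
      if st.1.getD r 0 > 0 then
        (st.1.insert r (st.1.getD r 0 - 1), st.2.1 ++ [r], st.2.2.1, st.2.2.2.insert r (st.2.2.2.getD r 0 + 1))
      else (st.1, st.2.1, st.2.2.1 ++ [r], st.2.2.2))
    (avail, [], [], PySem.Dict.empty)
  let fin := recordsB.foldl
    (fun (st : PySem.Dict Int Int × List Int) r =>
      if st.1.getD r 0 > 0 then (st.1.insert r (st.1.getD r 0 - 1), st.2)
      else (st.1, st.2 ++ [r]))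
    (st.2.2.2, [])
  (st.2.1, st.2.2.1, fin.2)

-- ===== PRECONDITION & SPEC =====
def Spec_match_trade_records (recordsA : List Int) (recordsB : List Int) (out : List Int × List Int × List Int) : Prop := out = match_trade_records_alt recordsA recordsB
instance (recordsA : List Int) (recordsB : List Int) (out : List Int × List Int × List Int) : Decidable (Spec_match_trade_records recordsA recordsB out) := by unfold Spec_match_trade_records; infer_instance

-- ===== CLAIM (what is proved, stated in full; the proofs are below) =====
def Claim_equal_match_trade_records : Prop := ∀ (recordsA : List Int) (recordsB : List Int), Dom_match_trade_records recordsA recordsB → Spec_match_trade_records recordsA recordsB (match_trade_records recordsA recordsB)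

-- ===== LEMMAS AND PROOFS =====

-- Model of B's leftover pass: drop, per value v, the first (f v) occurrences of v.
def dropF : List Int → (Int → Int) → List Int
  | [], _ => []
  | b :: bs, f => if f b > 0 then dropF bs (fun v => if v = b then f v - 1 else f v) else b :: dropF bs f

theorem dropF_zero (bs : List Int) : dropF bs (fun _ => (0 : Int)) = bs := by
  induction bs with
  | nil => rfl
  | cons b bs ih => simp [dropF, ih]

-- B's final pass over recordsB computes dropF of the removed-counts function.
theorem lastpass (bs : List Int) (d : PySem.Dict Int Int) (acc : List Int) :
    (bs.foldl (fun (st : PySem.Dict Int Int × List Int) r =>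
        if st.1.getD r 0 > 0 then (st.1.insert r (st.1.getD r 0 - 1), st.2)
        else (st.1, st.2 ++ [r])) (d, acc)).2
      = acc ++ dropF bs (fun v => d.getD v 0) := by
  induction bs generalizing d acc with
  | nil => simp [dropF]
  | cons b bs ih =>
    by_cases h : d.getD b 0 > 0
    · simp only [List.foldl_cons, dropF, h]
      rw [ih]
      congr 1
      congr 1
      funext v
      by_cases hv : v = b <;> simp [PySem.Dict.getD_insert, hv]
    · simp only [List.foldl_cons, dropF, h]
      rw [ih]
      simp

-- Removing one more first-occurrence of r via dropF equals List.erase on the result.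
theorem dropF_erase (bs : List Int) (f : Int → Int) (r : Int)
    (hnn : ∀ v, 0 ≤ f v) (hmem : r ∈ dropF bs f) :
    dropF bs (fun v => if v = r then f v + 1 else f v) = (dropF bs f).erase r := by
  induction bs generalizing f with
  | nil => simp [dropF] at hmem
  | cons b bs ih =>
    by_cases hb : f b > 0
    · have hb' : (if b = r then f b + 1 else f b) > 0 := by split <;> omega
      simp only [dropF, if_pos hb, if_pos hb'] at hmem ⊢
      have heq : (fun v => if v = b then (if v = r then f v + 1 else f v) - 1 else (if v = r then f v + 1 else f v))
          = (fun v => if v = r then (if v = b then f v - 1 else f v) + 1 else (if v = b then f v - 1 else f v)) := by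
        funext v; split_ifs <;> omega
      rw [heq, ih _ (by intro v; by_cases h1 : v = b <;> simp [h1] <;> [omega; exact hnn v]) hmem]
    · simp only [dropF, if_neg hb] at hmem ⊢
      by_cases hbr : b = r
      · have h0 : f b = 0 := le_antisymm (by omega) (hnn b)
        have hpos : (if b = r then f b + 1 else f b) > 0 := by rw [if_pos hbr]; omega
        rw [if_pos hpos]
        have heq : (fun v => if v = b then (if v = r then f v + 1 else f v) - 1 else (if v = r then f v + 1 else f v)) = f := by
          funext v; split_ifs <;> omega
        rw [heq, hbr, List.erase_cons_head]
      · have hb' : ¬ (if b = r then f b + 1 else f b) > 0 := by rw [if_neg hbr]; omega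
        rw [if_neg hb']
        have hmem' : r ∈ dropF bs f := by
          rcases List.mem_cons.mp hmem with h | h
          · exact absurd h.symm hbr
          · exact h
        rw [ih f hnn hmem']
        simp [hbr]

-- Main loop invariant: A's state (mg, ma, bs) corresponds to B's state (avail, mg, ma, removed)
-- when avail holds the multiset counts of bs and dropF of removed recovers bs from B0.
theorem mainLem (ra : List Int) (B0 bs : List Int) (avail removed : PySem.Dict Int Int)
    (mg ma : List Int)
    (hav : ∀ v, avail.getD v 0 = (bs.count v : Int))
    (hrm : ∀ v, 0 ≤ removed.getD v 0)
    (hdrop : dropF B0 (fun v => removed.getD v 0) = bs) :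
    ra.foldl (fun (st : List Int × List Int × List Int) record =>
        if record ∈ st.2.2 then (st.1 ++ [record], st.2.1, st.2.2.erase record)
        else (st.1, st.2.1 ++ [record], st.2.2)) (mg, ma, bs)
    = (let s := ra.foldl (fun (st : PySem.Dict Int Int × List Int × List Int × PySem.Dict Int Int) r =>
          if st.1.getD r 0 > 0 then
            (st.1.insert r (st.1.getD r 0 - 1), st.2.1 ++ [r], st.2.2.1, st.2.2.2.insert r (st.2.2.2.getD r 0 + 1))
          else (st.1, st.2.1, st.2.2.1 ++ [r], st.2.2.2)) (avail, mg, ma, removed);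
        (s.2.1, s.2.2.1, dropF B0 (fun v => s.2.2.2.getD v 0))) := by
  induction ra generalizing bs avail removed mg ma with
  | nil => simpa using hdrop.symm
  | cons r ra ih =>
    by_cases hm : r ∈ bs
    · have hpos : avail.getD r 0 > 0 := by
        rw [hav r]; exact_mod_cast List.count_pos_iff.mpr hm
      simp only [List.foldl_cons, if_pos hm, if_pos hpos]
      apply ih
      · intro v
        rw [PySem.Dict.getD_insert]
        by_cases hv : v = r
        · subst hv
          rw [hav v, if_pos rfl, List.count_erase_self]
          have := List.count_pos_iff.mpr hm
          omega
        · rw [if_neg hv, hav v, List.count_erase_of_ne hv]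
      · intro v
        rw [PySem.Dict.getD_insert]
        by_cases hv : v = r <;> simp [hv] <;> [linarith [hrm r]; exact hrm v]
      · have heq : (fun v => (removed.insert r (removed.getD r 0 + 1)).getD v 0)
            = (fun v => if v = r then removed.getD v 0 + 1 else removed.getD v 0) := by
          funext v; rw [PySem.Dict.getD_insert]; by_cases hv : v = r <;> simp [hv]
        rw [heq, dropF_erase B0 _ r hrm (hdrop ▸ hm), hdrop]
    · have hpos : ¬ avail.getD r 0 > 0 := by
        rw [hav r, List.count_eq_zero.mpr hm]; simp
      simp only [List.foldl_cons, if_neg hm, if_neg hpos]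
      exact ih bs avail removed mg (ma ++ [r]) hav hrm hdrop

-- ===== VERDICT (by name: the statement is the Claim_ definition above) =====
theorem match_trade_records_spec : Claim_equal_match_trade_records := by
  intro recordsA recordsB _
  show match_trade_records recordsA recordsB = match_trade_records_alt recordsA recordsB
  simp only [match_trade_records, match_trade_records_alt]
  rw [lastpass]
  simp only [List.nil_append]
  apply mainLem
  · intro v
    rw [PySem.Dict.getD_foldl_insert_add_one, PySem.Dict.getD_empty]
    simp
  · intro v
    rw [PySem.Dict.getD_empty]
  · have : (fun v => (PySem.Dict.empty : PySem.Dict Int Int).getD v 0) = (fun _ => (0:Int)) := by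
      funext v; rw [PySem.Dict.getD_empty]
    rw [this, dropF_zero]
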